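-- pv_equiv track=rewrite | github.com/nlpersECJTU/NLP-Projects-For-Beginner | P5 Seq2Seq/mt/bleu.py | bleu_stats
-- ===== SOURCE A (Python) =====
-- from collections import Counter
--
-- def bleu_stats(hypothesis, reference):
--     """Compute statistics for BLEU."""
--     stats = []
--     stats.append(len(hypothesis))
--     stats.append(len(reference))
--     # 1-gram, 2-gram, 3-gram, 4-gram
--     for n in range(1, 5):
--         h_ngrams = Counter([tuple(hypothesis[i: i+n]) for i in range(len(hypothesis) + 1 - n)])
--         r_ngrams = Counter([tuple(reference[i: i+n]) for i in range(len(reference) + 1 - n)])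
--
--         stats.append(max([sum((h_ngrams & r_ngrams).values()), 0]))
--         stats.append(max([len(hypothesis) + 1 - n, 0]))
--     return stats
-- ===== SOURCE B (Python) =====
-- def bleu_stats(hypothesis, reference):
--     """Compute statistics for BLEU."""
--     stats = [len(hypothesis), len(reference)]
--     for n in range(1, 5):
--         budget = {}
--         for i in range(len(reference) + 1 - n):
--             g = tuple(reference[i: i + n])
--             budget[g] = budget.get(g, 0) + 1
--         match = 0
--         for i in range(len(hypothesis) + 1 - n):
--             g = tuple(hypothesis[i: i + n])
--             b = budget.get(g, 0)
--             if b > 0: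
--                 match += 1
--                 budget[g] = b - 1
--         stats.append(max(match, 0))
--         stats.append(max(len(hypothesis) + 1 - n, 0))
--     return stats
-- ===== Notes on version B (the rewrite author's own statement) =====
-- stated objective: alternative
-- what changed: B drops the hypothesis Counter and the Counter intersection entirely: it builds only the reference n-gram counts and streams the hypothesis n-grams in order against a mutable decrementing budget, counting a match whenever the remaining budget is positive.
import Mathlib
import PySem

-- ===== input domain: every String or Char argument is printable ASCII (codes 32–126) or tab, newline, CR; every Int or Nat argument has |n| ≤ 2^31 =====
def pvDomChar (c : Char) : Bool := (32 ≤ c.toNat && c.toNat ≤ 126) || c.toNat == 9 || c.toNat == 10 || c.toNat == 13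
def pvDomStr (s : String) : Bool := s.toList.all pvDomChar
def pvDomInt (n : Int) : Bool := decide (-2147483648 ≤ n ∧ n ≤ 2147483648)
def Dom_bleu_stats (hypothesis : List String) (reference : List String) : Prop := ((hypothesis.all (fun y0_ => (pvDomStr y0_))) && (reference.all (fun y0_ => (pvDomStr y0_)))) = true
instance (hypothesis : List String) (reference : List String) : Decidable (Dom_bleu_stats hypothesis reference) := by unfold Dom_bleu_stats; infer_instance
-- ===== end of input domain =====

-- B replaces A's per-n hypothesis Counter + Counter intersection by a single streaming pass of the
-- hypothesis n-grams against a decrementing reference-count budget (same cost, different algorithm).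

-- ===== PORT A =====
-- Counter(list-of-ngrams) is PySem.Dict.counter; 'h_ngrams & r_ngrams' is ported step for step after
-- CPython's Counter.__and__ (iterate self.items(), newcount = min, keep if positive), then .values() sum.
def bleu_stats (hypothesis : List String) (reference : List String) : List Int :=
  let stats : List Int := []
  let stats := stats ++ [(hypothesis.length : Int)]
  let stats := stats ++ [(reference.length : Int)]
  (PySem.List.pyRange 1 5 1).foldl (fun stats n =>
    let h_ngrams := PySem.Dict.counter
      ((PySem.List.pyRange 0 ((hypothesis.length : Int) + 1 - n) 1).map
        (fun i => PySem.List.slice hypothesis (some i) (some (i + n))))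
    let r_ngrams := PySem.Dict.counter
      ((PySem.List.pyRange 0 ((reference.length : Int) + 1 - n) 1).map
        (fun i => PySem.List.slice reference (some i) (some (i + n))))
    let inter := h_ngrams.items.foldl (fun d p =>
        let other_count := r_ngrams.getD p.1 0
        let newcount := if p.2 < other_count then p.2 else other_count
        if 0 < newcount then d.insert p.1 newcount else d) PySem.Dict.empty
    let stats := stats ++ [max inter.values.sum 0]
    stats ++ [max ((hypothesis.length : Int) + 1 - n) 0]) stats

-- ===== PORT B =====
def bleu_stats_alt (hypothesis : List String) (reference : List String) : List Int :=
  let stats : List Int := [(hypothesis.length : Int), (reference.length : Int)]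
  (PySem.List.pyRange 1 5 1).foldl (fun stats n =>
    let budget := (PySem.List.pyRange 0 ((reference.length : Int) + 1 - n) 1).foldl
      (fun d i =>
        let g := PySem.List.slice reference (some i) (some (i + n))
        d.insert g (d.getD g 0 + 1)) (PySem.Dict.empty : PySem.Dict (List String) Int)
    let res := (PySem.List.pyRange 0 ((hypothesis.length : Int) + 1 - n) 1).foldl
      (fun st i =>
        let g := PySem.List.slice hypothesis (some i) (some (i + n))
        let b := st.1.getD g 0
        if 0 < b then (st.1.insert g (b - 1), st.2 + 1) else st) (budget, (0 : Int))
    stats ++ [max res.2 0, max ((hypothesis.length : Int) + 1 - n) 0]) stats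

-- ===== PRECONDITION & SPEC =====
def Spec_bleu_stats (hypothesis : List String) (reference : List String) (out : List Int) : Prop := out = bleu_stats_alt hypothesis reference
instance (hypothesis : List String) (reference : List String) (out : List Int) : Decidable (Spec_bleu_stats hypothesis reference out) := by unfold Spec_bleu_stats; infer_instance

-- ===== CLAIM (what is proved, stated in full; the proofs are below) =====
def Claim_equal_bleu_stats : Prop := ∀ (hypothesis : List String) (reference : List String), Dom_bleu_stats hypothesis reference → Spec_bleu_stats hypothesis reference (bleu_stats hypothesis reference)

-- ===== LEMMAS AND PROOFS =====

-- the common value both per-n match statistics equal: sum over the distinct hypothesis n-grams of min(h-count, r-count)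
def pvMSum (hgs rgs : List (List String)) : Int :=
  ((PySem.Set.ofList hgs).map (fun k => min ((hgs.count k : Int)) ((rgs.count k : Int)))).sum

lemma pv_sum_succ_at (S : List (List String)) (g : List String) (f f' : List String → Int)
    (hS : S.Nodup) (hg : g ∈ S) (hne : ∀ k ∈ S, k ≠ g → f k = f' k) (heq : f g = f' g + 1) :
    (S.map f).sum = (S.map f').sum + 1 := by
  induction S with
  | nil => cases hg
  | cons x t ih =>
    rcases List.mem_cons.mp hg with rfl | hgt
    · have : t.map f = t.map f' := by
        apply List.map_congr_left
        intro k hk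
        exact hne k (List.mem_cons_of_mem _ hk) (fun h => (List.nodup_cons.mp hS).1 (h ▸ hk))
      simp [this, heq]; ring
    · have hx : f x = f' x := by
        apply hne x List.mem_cons_self
        intro h; exact (List.nodup_cons.mp hS).1 (h ▸ hgt)
      have := ih (List.nodup_cons.mp hS).2 hgt (fun k hk => hne k (List.mem_cons_of_mem _ hk))
      simp only [List.map_cons, List.sum_cons, hx, this]; ring

-- the streaming pass of B: match total = sum over any superset S of the distinct grams of min(count, budget)
lemma pv_stream_eq (gs : List (List String)) (S : List (List String))
    (bd : PySem.Dict (List String) Int) (m : Int)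
    (hS : S.Nodup) (hsub : ∀ g ∈ gs, g ∈ S) (hpos : ∀ k, 0 ≤ bd.getD k 0) :
    (gs.foldl (fun st g =>
        let b := st.1.getD g 0
        if 0 < b then (st.1.insert g (b - 1), st.2 + 1) else st) (bd, m)).2
    = m + (S.map (fun k => min ((gs.count k : Int)) (bd.getD k 0))).sum := by
  induction gs generalizing bd m with
  | nil =>
    simp only [List.foldl_nil]
    have h0 : S.map (fun k => min ((([] : List (List String)).count k : Int)) (bd.getD k 0))
        = S.map (fun _ => (0 : Int)) := by
      apply List.map_congr_left; intro k _
      have := hpos k; simp [List.count_nil]; omega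
    rw [h0]; simp
  | cons g t ih =>
    have hgS : g ∈ S := hsub g List.mem_cons_self
    simp only [List.foldl_cons]
    by_cases hb : 0 < bd.getD g 0
    · simp only [hb, if_pos]
      rw [ih (bd.insert g (bd.getD g 0 - 1)) (m + 1) (fun g' hg' => hsub g' (List.mem_cons_of_mem _ hg'))]
      · have hsum : (S.map (fun k => min (((g :: t).count k : Int)) (bd.getD k 0))).sum
            = (S.map (fun k => min ((t.count k : Int)) ((bd.insert g (bd.getD g 0 - 1)).getD k 0))).sum + 1 := by
          apply pv_sum_succ_at S g _ _ hS hgS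
          · intro k _ hk
            rw [PySem.Dict.getD_insert_of_ne _ _ _ hk]
            simp [Ne.symm hk]
          · rw [PySem.Dict.getD_insert_self]
            have := hpos g
            simp only [List.count_cons, BEq.rfl, if_true]
            push_cast
            omega
        rw [hsum]; ring
      · intro k
        rw [PySem.Dict.getD_insert]
        split_ifs with h
        · omega
        · exact hpos k
    · simp only [hb, if_neg, not_false_iff]
      rw [ih bd m (fun g' hg' => hsub g' (List.mem_cons_of_mem _ hg')) hpos]
      have : S.map (fun k => min (((g :: t).count k : Int)) (bd.getD k 0))
          = S.map (fun k => min ((t.count k : Int)) (bd.getD k 0)) := by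
        apply List.map_congr_left; intro k _
        by_cases hk : k = g
        · subst hk
          have h0 : bd.getD k 0 = 0 := le_antisymm (by omega) (hpos k)
          rw [h0]
          simp only [List.count_cons, BEq.rfl, if_true]
          push_cast; omega
        · simp [Ne.symm hk]
      rw [this]

-- A's intersection pass over a list of distinct fresh keys: sum of inserted values
lemma pv_inter_values (L : List (List String)) (v : List String → Int) :
    ∀ d : PySem.Dict (List String) Int, L.Nodup → (∀ k ∈ L, d.contains k = false) →
    ((L.foldl (fun d k => if 0 < v k then d.insert k (v k) else d) d).values).sum
    = d.values.sum + (L.map (fun k => max (v k) 0)).sum := by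
  induction L with
  | nil => intro d _ _; simp
  | cons g t ih =>
    intro d hnd hfresh
    simp only [List.foldl_cons]
    by_cases hv : 0 < v g
    · simp only [hv, if_pos]
      rw [ih (d.insert g (v g)) (List.nodup_cons.mp hnd).2 ?_]
      · have : (d.insert g (v g)).values.sum = d.values.sum + v g := by
          have hni := PySem.Dict.items_insert_of_not_contains d (v g) (hfresh g List.mem_cons_self)
          simp only [PySem.Dict.values, hni, List.map_append, List.sum_append]
          simp
        rw [this]
        have : max (v g) 0 = v g := by omega
        simp only [List.map_cons, List.sum_cons, this]; ring
      · intro k hk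
        rw [PySem.Dict.contains_insert]
        have hkg : k ≠ g := fun h => (List.nodup_cons.mp hnd).1 (h ▸ hk)
        simp [hkg, hfresh k (List.mem_cons_of_mem _ hk)]
    · simp only [hv, if_neg, not_false_iff]
      rw [ih d (List.nodup_cons.mp hnd).2 (fun k hk => hfresh k (List.mem_cons_of_mem _ hk))]
      have : max (v g) 0 = 0 := by omega
      simp only [List.map_cons, List.sum_cons, this]; ring

-- A's per-n match value equals pvMSum
lemma pv_A_match (hgs rgs : List (List String)) :
    ((PySem.Dict.counter hgs).items.foldl (fun d p =>
        let other_count := (PySem.Dict.counter rgs).getD p.1 0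
        let newcount := if p.2 < other_count then p.2 else other_count
        if 0 < newcount then d.insert p.1 newcount else d) PySem.Dict.empty).values.sum
    = pvMSum hgs rgs := by
  rw [PySem.Dict.items_counter, List.foldl_map]
  have hbody : ∀ (d : PySem.Dict (List String) Int) (k : List String),
      (fun d (p : List String × Int) =>
        let other_count := (PySem.Dict.counter rgs).getD p.1 0
        let newcount := if p.2 < other_count then p.2 else other_count
        if 0 < newcount then d.insert p.1 newcount else d) d (k, (hgs.count k : Int))
      = (fun d k => if 0 < min ((hgs.count k : Int)) ((rgs.count k : Int)) then
          d.insert k (min ((hgs.count k : Int)) ((rgs.count k : Int))) else d) d k := by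
    intro d k
    simp only [PySem.Dict.getD_counter]
    have : (if (hgs.count k : Int) < (rgs.count k : Int) then (hgs.count k : Int) else (rgs.count k : Int))
        = min ((hgs.count k : Int)) ((rgs.count k : Int)) := by
      rw [min_def]; split_ifs <;> omega
    rw [this]
  have hfun : (fun (x : PySem.Dict (List String) Int) (y : List String) =>
      (fun d (p : List String × Int) =>
        let other_count := (PySem.Dict.counter rgs).getD p.1 0
        let newcount := if p.2 < other_count then p.2 else other_count
        if 0 < newcount then d.insert p.1 newcount else d) x (y, (hgs.count y : Int)))
      = (fun (x : PySem.Dict (List String) Int) (y : List String) =>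
        if 0 < min ((hgs.count y : Int)) ((rgs.count y : Int)) then
          x.insert y (min ((hgs.count y : Int)) ((rgs.count y : Int))) else x) := by
    funext d k; exact hbody d k
  rw [hfun]
  rw [pv_inter_values (PySem.Set.ofList hgs)
      (fun k => min ((hgs.count k : Int)) ((rgs.count k : Int)))
      PySem.Dict.empty (PySem.Set.nodup_ofList hgs) (by intro k _; simp [PySem.Dict.contains_empty])]
  have : (PySem.Set.ofList hgs).map (fun k => max (min ((hgs.count k : Int)) ((rgs.count k : Int))) 0)
      = (PySem.Set.ofList hgs).map (fun k => min ((hgs.count k : Int)) ((rgs.count k : Int))) := by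
    apply List.map_congr_left
    intro k hk
    have hk' : k ∈ hgs := (PySem.Set.mem_ofList _ _).mp hk
    have h1 : 1 ≤ hgs.count k := List.one_le_count_iff.mpr hk'
    have h2 : (0:Int) ≤ (rgs.count k : Int) := by positivity
    have h1' : (1:Int) ≤ (hgs.count k : Int) := by exact_mod_cast h1
    omega
  simp only [PySem.Dict.values, PySem.Dict.empty] at *
  rw [this]
  simp [pvMSum]

-- B's per-n match value equals pvMSum
lemma pv_B_match (hgs rgs : List (List String)) :
    (hgs.foldl (fun st g =>
        let b := st.1.getD g 0
        if 0 < b then (st.1.insert g (b - 1), st.2 + 1) else st)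
      (PySem.Dict.counter rgs, (0 : Int))).2 = pvMSum hgs rgs := by
  rw [pv_stream_eq hgs (PySem.Set.ofList hgs) (PySem.Dict.counter rgs) 0
      (PySem.Set.nodup_ofList hgs) (fun g hg => (PySem.Set.mem_ofList _ _).mpr hg)
      (by intro k; rw [PySem.Dict.getD_counter]; positivity)]
  have : (PySem.Set.ofList hgs).map (fun k => min ((hgs.count k : Int)) ((PySem.Dict.counter rgs).getD k 0))
      = (PySem.Set.ofList hgs).map (fun k => min ((hgs.count k : Int)) ((rgs.count k : Int))) := by
    apply List.map_congr_left; intro k _; rw [PySem.Dict.getD_counter]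
  rw [this]; simp [pvMSum]

-- per-n agreement of the two ports' appended match statistic
lemma pv_per_n (hypothesis reference : List String) (n : Int) :
    ((PySem.Dict.counter ((PySem.List.pyRange 0 ((hypothesis.length : Int) + 1 - n) 1).map
        (fun i => PySem.List.slice hypothesis (some i) (some (i + n))))).items.foldl (fun d p =>
        let other_count := (PySem.Dict.counter ((PySem.List.pyRange 0 ((reference.length : Int) + 1 - n) 1).map
          (fun i => PySem.List.slice reference (some i) (some (i + n))))).getD p.1 0
        let newcount := if p.2 < other_count then p.2 else other_count
        if 0 < newcount then d.insert p.1 newcount else d) PySem.Dict.empty).values.sum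
    = ((PySem.List.pyRange 0 ((hypothesis.length : Int) + 1 - n) 1).foldl
      (fun st i =>
        let g := PySem.List.slice hypothesis (some i) (some (i + n))
        let b := st.1.getD g 0
        if 0 < b then (st.1.insert g (b - 1), st.2 + 1) else st)
      ((PySem.List.pyRange 0 ((reference.length : Int) + 1 - n) 1).foldl
        (fun d i =>
          let g := PySem.List.slice reference (some i) (some (i + n))
          d.insert g (d.getD g 0 + 1)) (PySem.Dict.empty : PySem.Dict (List String) Int), (0 : Int))).2 := by
  set hgs := (PySem.List.pyRange 0 ((hypothesis.length : Int) + 1 - n) 1).map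
    (fun i => PySem.List.slice hypothesis (some i) (some (i + n))) with hh
  set rgs := (PySem.List.pyRange 0 ((reference.length : Int) + 1 - n) 1).map
    (fun i => PySem.List.slice reference (some i) (some (i + n))) with hr
  simp only [pv_A_match hgs rgs]
  have hbud : List.foldl (fun (d : PySem.Dict (List String) Int) i =>
      d.insert (PySem.List.slice reference (some i) (some (i + n)))
        (d.getD (PySem.List.slice reference (some i) (some (i + n))) 0 + 1))
      PySem.Dict.empty (PySem.List.pyRange 0 ((reference.length : Int) + 1 - n) 1)
      = PySem.Dict.counter rgs := by
    rw [hr, ← PySem.Dict.foldl_insert_getD_add_one_eq_counter, List.foldl_map]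
  have hstr : List.foldl (fun (st : PySem.Dict (List String) Int × Int) i =>
      if 0 < st.1.getD (PySem.List.slice hypothesis (some i) (some (i + n))) 0 then
        (st.1.insert (PySem.List.slice hypothesis (some i) (some (i + n)))
          (st.1.getD (PySem.List.slice hypothesis (some i) (some (i + n))) 0 - 1), st.2 + 1)
      else st) (PySem.Dict.counter rgs, (0 : Int))
      (PySem.List.pyRange 0 ((hypothesis.length : Int) + 1 - n) 1)
      = List.foldl (fun st g =>
          let b := st.1.getD g 0
          if 0 < b then (st.1.insert g (b - 1), st.2 + 1) else st)
        (PySem.Dict.counter rgs, (0 : Int)) hgs := by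
    rw [hh, List.foldl_map]
  rw [hbud, hstr, ← pv_B_match hgs rgs]

-- ===== VERDICT (by name: the statement is the Claim_ definition above) =====
theorem bleu_stats_spec : Claim_equal_bleu_stats := by
  intro hypothesis reference _
  unfold Spec_bleu_stats bleu_stats bleu_stats_alt
  have hrange : PySem.List.pyRange 1 5 1 = [1, 2, 3, 4] := by decide
  rw [hrange]
  simp only [List.foldl_cons, List.foldl_nil]
  rw [pv_per_n hypothesis reference 1, pv_per_n hypothesis reference 2,
      pv_per_n hypothesis reference 3, pv_per_n hypothesis reference 4]
  simp
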